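-- pv_equiv track=rewrite | github.com/internetkillls/Obsidian-Otto | scripts/_scarcity_common.py | extract_structured_tags
-- ===== SOURCE A (Python) =====
-- STRUCTURED_TAG_KEYS = (
--     "scarcity",
--     "necessity",
--     "artificial",
--     "orientation",
--     "allocation",
--     "cluster",
--     "cluster_membership",
-- )
--
-- def extract_structured_tags(tags: list[str]) -> dict[str, list[str]]:
--     metadata = {key: [] for key in STRUCTURED_TAG_KEYS}
--     for tag in tags:
--         lowered = tag.lower().strip()
--         for key in STRUCTURED_TAG_KEYS:
--             prefixes = (f"{key}/", f"{key}_", f"{key}-")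
--             prefix = next((candidate for candidate in prefixes if lowered.startswith(candidate)), None)
--             if prefix is None:
--                 continue
--             suffix = tag[len(prefix) :].strip()
--             if suffix:
--                 metadata[key].append(suffix)
--             break
--     return metadata
-- ===== SOURCE B (Python) =====
-- STRUCTURED_TAG_KEYS = (
--     "scarcity",
--     "necessity",
--     "artificial",
--     "orientation",
--     "allocation",
--     "cluster",
--     "cluster_membership",
-- )
--
-- _KEY_SET = frozenset(STRUCTURED_TAG_KEYS)
-- _SEPARATORS = frozenset("/_-")
--
-- def extract_structured_tags(tags: list[str]) -> dict[str, list[str]]: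
--     metadata = {key: [] for key in STRUCTURED_TAG_KEYS}
--     for tag in tags:
--         lowered = tag.lower().strip()
--         pos = next((i for i, ch in enumerate(lowered) if ch in _SEPARATORS), None)
--         if pos is None:
--             continue
--         candidate = lowered[:pos]
--         if candidate not in _KEY_SET:
--             continue
--         suffix = tag[pos + 1:].strip()
--         if suffix:
--             metadata[candidate].append(suffix)
--     return metadata
-- ===== Notes on version B (the rewrite author's own statement) =====
-- stated objective: faster
-- what changed: Replaces the per-tag inner loop over all 7 keys (building 3 prefix strings per key and testing startswith on each) by a single scan of the lowered tag for the first separator character '/','_','-', slicing the candidate key out once and testing it against a precomputed frozenset of keys.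
import Mathlib
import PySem

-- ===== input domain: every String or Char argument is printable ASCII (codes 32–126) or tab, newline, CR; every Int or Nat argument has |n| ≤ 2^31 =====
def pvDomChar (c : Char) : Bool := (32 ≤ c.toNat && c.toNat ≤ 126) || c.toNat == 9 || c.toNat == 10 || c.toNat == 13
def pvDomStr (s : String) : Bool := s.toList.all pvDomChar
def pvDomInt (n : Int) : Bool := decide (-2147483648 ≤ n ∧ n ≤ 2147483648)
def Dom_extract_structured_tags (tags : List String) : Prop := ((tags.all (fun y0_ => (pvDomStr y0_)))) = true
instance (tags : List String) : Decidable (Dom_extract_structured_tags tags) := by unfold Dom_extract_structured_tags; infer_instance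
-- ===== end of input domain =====

-- B replaces A's per-tag inner loop over all 7 keys (3 startswith prefix tests each) by one scan
-- for the first separator character plus a single set lookup of the candidate key (faster by a
-- constant factor, as measured); return values are proved identical on every input.

-- ===== PORT A =====
def STRUCTURED_TAG_KEYS : List String :=
  ["scarcity", "necessity", "artificial", "orientation", "allocation", "cluster", "cluster_membership"]

-- the inner 'for key in STRUCTURED_TAG_KEYS: … break' loop of A
def extractA_inner (lowered tag : String) (keys : List String)
    (metadata : PySem.Dict String (List String)) : PySem.Dict String (List String) :=
  match keys with
  | [] => metadata
  | key :: rest =>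
    let prefixes : List String := [key ++ "/", key ++ "_", key ++ "-"]
    match prefixes.find? (fun candidate => PySem.Str.startswith lowered candidate) with
    | none => extractA_inner lowered tag rest metadata
    | some prefix_ =>
      let suffix := PySem.Str.strip (PySem.Str.slice tag (some (PySem.Str.len prefix_)) none)
      if suffix ≠ "" then metadata.modify key [] (· ++ [suffix]) else metadata

def extract_structured_tags (tags : List String) : List (String × List String) :=
  let metadata : PySem.Dict String (List String) :=
    STRUCTURED_TAG_KEYS.foldl (fun d key => d.insert key []) PySem.Dict.empty
  (tags.foldl (fun d tag =>
      extractA_inner (PySem.Str.strip (PySem.Str.lower tag)) tag STRUCTURED_TAG_KEYS d) metadata).items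

-- ===== PORT B =====
def STRUCTURED_TAG_KEYS_B : List String :=
  ["scarcity", "necessity", "artificial", "orientation", "allocation", "cluster", "cluster_membership"]

def KEY_SET : PySem.Set String := PySem.Set.ofList STRUCTURED_TAG_KEYS_B   -- _KEY_SET = frozenset(...)
def SEPARATORS : PySem.Set Char := PySem.Set.ofList ['/', '_', '-']        -- _SEPARATORS = frozenset("/_-")

-- next((i for i, ch in enumerate(lowered) if ch in _SEPARATORS), None)
def extractB_firstSep (chars : List Char) (i : Int) : Option Int :=
  match chars with
  | [] => none
  | ch :: rest => if SEPARATORS.contains ch then some i else extractB_firstSep rest (i + 1)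

-- the body of B's 'for tag in tags' loop
def extractB_step (metadata : PySem.Dict String (List String)) (tag : String) :
    PySem.Dict String (List String) :=
  let lowered := PySem.Str.strip (PySem.Str.lower tag)
  match extractB_firstSep lowered.toList 0 with
  | none => metadata
  | some pos =>
    let candidate := PySem.Str.slice lowered none (some pos)
    if KEY_SET.contains candidate then
      let suffix := PySem.Str.strip (PySem.Str.slice tag (some (pos + 1)) none)
      if suffix ≠ "" then metadata.modify candidate [] (· ++ [suffix]) else metadata
    else metadata

def extract_structured_tags_alt (tags : List String) : List (String × List String) :=
  let metadata : PySem.Dict String (List String) :=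
    STRUCTURED_TAG_KEYS_B.foldl (fun d key => d.insert key []) PySem.Dict.empty
  (tags.foldl extractB_step metadata).items

-- ===== PRECONDITION & SPEC =====
def Spec_extract_structured_tags (tags : List String) (out : List (String × List String)) : Prop := out = extract_structured_tags_alt tags
instance (tags : List String) (out : List (String × List String)) : Decidable (Spec_extract_structured_tags tags out) := by unfold Spec_extract_structured_tags; infer_instance

-- ===== CLAIM (what is proved, stated in full; the proofs are below) =====
def Claim_equal_extract_structured_tags : Prop := ∀ (tags : List String), Dom_extract_structured_tags tags → Spec_extract_structured_tags tags (extract_structured_tags tags)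

-- ===== LEMMAS AND PROOFS =====

-- a Python-startswith test against a one-separator prefix, moved to the char-list level
lemma startswith_prefix_eq (lowered key : String) (c : Char) (s : String) (hs : s.toList = [c]) :
    PySem.Str.startswith lowered (key ++ s) =
      PySem.Chars.startswith lowered.toList (key.toList ++ [c]) := by
  rw [PySem.Str.startswith_eq, String.toList_append, hs]

lemma sw_hit (pre : List Char) (s : Char) (rest : List Char) :
    PySem.Chars.startswith (pre ++ s :: rest) (pre ++ [s]) = true :=
  (PySem.Chars.startswith_iff _ _).mpr ⟨rest, by simp⟩

lemma sw_append_ne (pre : List Char) (a b : Char) (rest : List Char) (h : b ≠ a) :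
    PySem.Chars.startswith (pre ++ a :: rest) (pre ++ [b]) = false := by
  apply Bool.eq_false_iff.mpr
  intro hsw
  have hp := (PySem.Chars.startswith_iff _ _).mp hsw
  have hb : [b] <+: a :: rest := (List.prefix_append_right_inj pre).mp hp
  exact h (List.cons_prefix_cons.mp hb).1

-- no separator occurs in L: no key+separator prefix can match
lemma sw_nosep (L k : List Char) (s' : Char)
    (hL : ∀ c ∈ L, SEPARATORS.contains c = false) (hs' : SEPARATORS.contains s' = true) :
    PySem.Chars.startswith L (k ++ [s']) = false := by
  apply Bool.eq_false_iff.mpr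
  intro hsw
  have hp := (PySem.Chars.startswith_iff _ _).mp hsw
  have hmem : s' ∈ L := hp.sublist.subset (by simp)
  rw [hL s' hmem] at hs'
  cases hs'

-- L = pre ++ s :: rest with pre separator-free; a separator-free key k ≠ pre never matches
lemma sw_keyfree (pre : List Char) (s : Char) (rest k : List Char) (s' : Char)
    (hpre : ∀ c ∈ pre, SEPARATORS.contains c = false)
    (hs : SEPARATORS.contains s = true) (hs' : SEPARATORS.contains s' = true)
    (hk : ∀ c ∈ k, SEPARATORS.contains c = false) (hne : pre ≠ k) :
    PySem.Chars.startswith (pre ++ s :: rest) (k ++ [s']) = false := by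
  apply Bool.eq_false_iff.mpr
  intro hsw
  have hp : k ++ [s'] <+: pre ++ s :: rest := (PySem.Chars.startswith_iff _ _).mp hsw
  have hkL : k <+: pre ++ s :: rest := (List.prefix_append k [s']).trans hp
  have hpreP : pre <+: pre ++ s :: rest := List.prefix_append pre (s :: rest)
  have hpreL : pre ++ [s] <+: pre ++ s :: rest := ⟨rest, by simp⟩
  rcases lt_trichotomy k.length pre.length with hlt | heq | hgt
  · have h1 : k ++ [s'] <+: pre :=
      List.prefix_of_prefix_length_le hp hpreP (by simp; omega)
    have : s' ∈ pre := h1.sublist.subset (by simp)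
    rw [hpre s' this] at hs'; cases hs'
  · have h1 : k <+: pre := List.prefix_of_prefix_length_le hkL hpreP (by omega)
    exact hne (h1.eq_of_length heq).symm
  · have h1 : pre ++ [s] <+: k :=
      List.prefix_of_prefix_length_le hpreL hkL (by simp; omega)
    have : s ∈ k := h1.sublist.subset (by simp)
    rw [hk s this] at hs; cases hs

-- the key "cluster_membership" = "cluster" ++ '_' :: "membership": it never matches unless pre = "cluster"
lemma sw_cm (pre : List Char) (s : Char) (rest k1 : List Char) (c0 : Char) (k2 : List Char) (s' : Char)
    (hpre : ∀ c ∈ pre, SEPARATORS.contains c = false)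
    (hs : SEPARATORS.contains s = true)
    (hk1 : ∀ c ∈ k1, SEPARATORS.contains c = false) (hc0 : SEPARATORS.contains c0 = true)
    (hne : pre ≠ k1) :
    PySem.Chars.startswith (pre ++ s :: rest) ((k1 ++ c0 :: k2) ++ [s']) = false := by
  apply Bool.eq_false_iff.mpr
  intro hsw
  have hp : (k1 ++ c0 :: k2) ++ [s'] <+: pre ++ s :: rest := (PySem.Chars.startswith_iff _ _).mp hsw
  have hk1c : k1 ++ [c0] <+: (k1 ++ c0 :: k2) ++ [s'] := ⟨k2 ++ [s'], by simp⟩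
  have hk1L : k1 ++ [c0] <+: pre ++ s :: rest := hk1c.trans hp
  have hk1L' : k1 <+: pre ++ s :: rest := (List.prefix_append k1 [c0]).trans hk1L
  have hpreP : pre <+: pre ++ s :: rest := List.prefix_append pre (s :: rest)
  have hpreL : pre ++ [s] <+: pre ++ s :: rest := ⟨rest, by simp⟩
  rcases lt_trichotomy k1.length pre.length with hlt | heq | hgt
  · have h1 : k1 ++ [c0] <+: pre :=
      List.prefix_of_prefix_length_le hk1L hpreP (by simp; omega)
    have : c0 ∈ pre := h1.sublist.subset (by simp)
    rw [hpre c0 this] at hc0; cases hc0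
  · have h1 : k1 <+: pre := List.prefix_of_prefix_length_le hk1L' hpreP (by omega)
    exact hne (h1.eq_of_length heq).symm
  · have h1 : pre ++ [s] <+: k1 :=
      List.prefix_of_prefix_length_le hpreL hk1L' (by simp; omega)
    have : s ∈ k1 := h1.sublist.subset (by simp)
    rw [hk1 s this] at hs; cases hs

-- one key of A's inner loop is skipped when all three of its prefixes fail
lemma innerA_skip_of (lowered tag : String) (d : PySem.Dict String (List String))
    (key : String) (keys : List String)
    (h : ∀ sep ∈ (['/', '_', '-'] : List Char),
      PySem.Chars.startswith lowered.toList (key.toList ++ [sep]) = false) :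
    extractA_inner lowered tag (key :: keys) d = extractA_inner lowered tag keys d := by
  have g1 : PySem.Str.startswith lowered (key ++ "/") = false := by
    rw [startswith_prefix_eq lowered key '/' "/" (by decide)]; exact h '/' (by decide)
  have g2 : PySem.Str.startswith lowered (key ++ "_") = false := by
    rw [startswith_prefix_eq lowered key '_' "_" (by decide)]; exact h '_' (by decide)
  have g3 : PySem.Str.startswith lowered (key ++ "-") = false := by
    rw [startswith_prefix_eq lowered key '-' "-" (by decide)]; exact h '-' (by decide)
  simp only [extractA_inner, List.find?, g1, g2, g3]

-- A's inner loop hits key when lowered = key ++ sep ++ rest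
lemma innerA_match (lowered tag : String) (d : PySem.Dict String (List String))
    (key : String) (keys : List String) (s : Char) (rest : List Char)
    (hL : lowered.toList = key.toList ++ s :: rest) (hs : s = '/' ∨ s = '_' ∨ s = '-') :
    extractA_inner lowered tag (key :: keys) d =
      (let suffix := PySem.Str.strip (PySem.Str.slice tag (some ((key.toList.length : Int) + 1)) none);
       if suffix ≠ "" then d.modify key [] (· ++ [suffix]) else d) := by
  have hlen : ∀ t : String, t.toList = [s] → PySem.Str.len (key ++ t) = (key.toList.length : Int) + 1 := by
    intro t ht
    rw [PySem.Str.len_eq, String.toList_append, ht]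
    simp
  rcases hs with h | h | h <;> subst h
  · have g1 : PySem.Str.startswith lowered (key ++ "/") = true := by
      rw [startswith_prefix_eq lowered key '/' "/" (by decide), hL]; exact sw_hit _ _ _
    simp only [extractA_inner, List.find?, g1, hlen "/" (by decide)]
  · have g1 : PySem.Str.startswith lowered (key ++ "/") = false := by
      rw [startswith_prefix_eq lowered key '/' "/" (by decide), hL]
      exact sw_append_ne _ _ _ _ (by decide)
    have g2 : PySem.Str.startswith lowered (key ++ "_") = true := by
      rw [startswith_prefix_eq lowered key '_' "_" (by decide), hL]; exact sw_hit _ _ _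
    simp only [extractA_inner, List.find?, g1, g2, hlen "_" (by decide)]
  · have g1 : PySem.Str.startswith lowered (key ++ "/") = false := by
      rw [startswith_prefix_eq lowered key '/' "/" (by decide), hL]
      exact sw_append_ne _ _ _ _ (by decide)
    have g2 : PySem.Str.startswith lowered (key ++ "_") = false := by
      rw [startswith_prefix_eq lowered key '_' "_" (by decide), hL]
      exact sw_append_ne _ _ _ _ (by decide)
    have g3 : PySem.Str.startswith lowered (key ++ "-") = true := by
      rw [startswith_prefix_eq lowered key '-' "-" (by decide), hL]; exact sw_hit _ _ _
    simp only [extractA_inner, List.find?, g1, g2, g3, hlen "-" (by decide)]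

-- B's generator found no separator: no character of the scanned list is a separator
lemma firstSep_none_spec (L : List Char) :
    ∀ i : Int, extractB_firstSep L i = none → ∀ c ∈ L, SEPARATORS.contains c = false := by
  induction L with
  | nil => intro i _ c hc; cases hc
  | cons ch cs ih =>
    intro i h c hc
    by_cases hch : SEPARATORS.contains ch = true
    · rw [extractB_firstSep, if_pos hch] at h
      cases h
    · rw [extractB_firstSep, if_neg hch] at h
      rcases List.mem_cons.mp hc with rfl | hc2
      · exact Bool.eq_false_iff.mpr hch
      · exact ih (i + 1) h c hc2

-- B's generator found the first separator: the scanned list splits at it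
lemma firstSep_some_spec (L : List Char) :
    ∀ i pos : Int, extractB_firstSep L i = some pos →
      ∃ (pre : List Char) (s : Char) (rest : List Char),
        L = pre ++ s :: rest ∧ pos = i + pre.length ∧
        (∀ c ∈ pre, SEPARATORS.contains c = false) ∧ SEPARATORS.contains s = true := by
  induction L with
  | nil => intro i pos h; cases h
  | cons ch cs ih =>
    intro i pos h
    by_cases hch : SEPARATORS.contains ch = true
    · rw [extractB_firstSep, if_pos hch] at h
      injection h with h'
      refine ⟨[], ch, cs, rfl, ?_, ?_, hch⟩
      · rw [← h']; simp
      · intro c hc; cases hc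
    · rw [extractB_firstSep, if_neg hch] at h
      obtain ⟨pre, s, rest, hEq, hpos, hpre, hs⟩ := ih (i + 1) pos h
      refine ⟨ch :: pre, s, rest, ?_, ?_, ?_, hs⟩
      · rw [hEq]; rfl
      · rw [hpos, List.length_cons]; push_cast; ring
      · intro c hc
        rcases List.mem_cons.mp hc with rfl | hc2
        · exact Bool.eq_false_iff.mpr hch
        · exact hpre c hc2

-- the per-tag loop bodies of A and B agree
set_option maxRecDepth 2048 in
lemma step_eq (d : PySem.Dict String (List String)) (tag : String) :
    extractA_inner (PySem.Str.strip (PySem.Str.lower tag)) tag STRUCTURED_TAG_KEYS d =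
      extractB_step d tag := by
  set lowered := PySem.Str.strip (PySem.Str.lower tag) with hlow
  cases hfs : extractB_firstSep lowered.toList 0 with
  | none =>
    have hB : extractB_step d tag = d := by
      simp only [extractB_step]
      rw [← hlow]
      rw [hfs]
    have hall := firstSep_none_spec lowered.toList 0 hfs
    have hskip : ∀ (k : String), ∀ sep ∈ (['/', '_', '-'] : List Char),
        PySem.Chars.startswith lowered.toList (k.toList ++ [sep]) = false := by
      intro k sep hsep
      refine sw_nosep _ _ _ hall ?_
      fin_cases hsep <;> decide
    rw [hB]
    simp only [STRUCTURED_TAG_KEYS]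
    rw [innerA_skip_of _ _ _ _ _ (hskip _), innerA_skip_of _ _ _ _ _ (hskip _),
        innerA_skip_of _ _ _ _ _ (hskip _), innerA_skip_of _ _ _ _ _ (hskip _),
        innerA_skip_of _ _ _ _ _ (hskip _), innerA_skip_of _ _ _ _ _ (hskip _),
        innerA_skip_of _ _ _ _ _ (hskip _)]
    rfl
  | some pos =>
    obtain ⟨pre, s, rest, hL, hpos, hpre, hs⟩ := firstSep_some_spec lowered.toList 0 pos hfs
    have hpos' : pos = (pre.length : Int) := by omega
    have hcand : (PySem.Str.slice lowered none (some pos)).toList = pre := by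
      rw [PySem.Str.toList_slice, PySem.Chars.slice_eq_listSlice, hpos', hL,
          PySem.List.slice_to_natCast, List.take_left]
    have hS : SEPARATORS = ['/', '_', '-'] := by decide
    have hsd : s = '/' ∨ s = '_' ∨ s = '-' := by
      rw [hS] at hs
      have := List.mem_of_elem_eq_true hs
      simpa using this
    cases hkc : KEY_SET.contains (PySem.Str.slice lowered none (some pos)) with
    | false =>
      have hB : extractB_step d tag = d := by
        simp only [extractB_step]
        rw [← hlow]
        simp only [hfs]
        rw [if_neg]
        rw [hkc]
        exact Bool.false_ne_true
      have hneq : ∀ (k : String), KEY_SET.contains k = true → pre ≠ k.toList := by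
        intro k hkm hEq
        have hck : PySem.Str.slice lowered none (some pos) = k :=
          String.toList_inj.mp (by rw [hcand, hEq])
        rw [hck, hkm] at hkc
        cases hkc
      have hskip : ∀ (k : String), (∀ c ∈ k.toList, SEPARATORS.contains c = false) →
          pre ≠ k.toList → ∀ sep ∈ (['/', '_', '-'] : List Char),
          PySem.Chars.startswith lowered.toList (k.toList ++ [sep]) = false := by
        intro k hkfree hnek sep hsep
        rw [hL]
        refine sw_keyfree pre s rest k.toList sep hpre hs ?_ hkfree hnek
        fin_cases hsep <;> decide
      have hskip_cm : ∀ sep ∈ (['/', '_', '-'] : List Char),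
          PySem.Chars.startswith lowered.toList (("cluster_membership" : String).toList ++ [sep]) = false := by
        intro sep hsep
        rw [hL, show ("cluster_membership" : String).toList =
              ("cluster" : String).toList ++ '_' :: ("membership" : String).toList from by decide]
        refine sw_cm pre s rest _ '_' _ sep hpre hs (by simp [SEPARATORS]) (by decide)
          (hneq "cluster" (by decide))
      rw [hB]
      simp only [STRUCTURED_TAG_KEYS]
      rw [innerA_skip_of _ _ _ _ _ (hskip "scarcity" (by simp [SEPARATORS]) (hneq _ (by decide))),
          innerA_skip_of _ _ _ _ _ (hskip "necessity" (by simp [SEPARATORS]) (hneq _ (by decide))),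
          innerA_skip_of _ _ _ _ _ (hskip "artificial" (by simp [SEPARATORS]) (hneq _ (by decide))),
          innerA_skip_of _ _ _ _ _ (hskip "orientation" (by simp [SEPARATORS]) (hneq _ (by decide))),
          innerA_skip_of _ _ _ _ _ (hskip "allocation" (by simp [SEPARATORS]) (hneq _ (by decide))),
          innerA_skip_of _ _ _ _ _ (hskip "cluster" (by simp [SEPARATORS]) (hneq _ (by decide))),
          innerA_skip_of _ _ _ _ _ hskip_cm]
      rfl
    | true =>
      have hB : extractB_step d tag =
          (let suffix := PySem.Str.strip (PySem.Str.slice tag (some (pos + 1)) none);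
           if suffix ≠ "" then
             d.modify (PySem.Str.slice lowered none (some pos)) [] (· ++ [suffix])
           else d) := by
        simp only [extractB_step]
        rw [← hlow]
        simp only [hfs]
        rw [if_pos hkc]
      have hmem := List.mem_of_elem_eq_true hkc
      have hK : KEY_SET = ["scarcity", "necessity", "artificial", "orientation",
          "allocation", "cluster", "cluster_membership"] := by decide
      rw [hK] at hmem
      simp only [List.mem_cons, List.not_mem_nil, or_false] at hmem
      have hskip2 : ∀ (K k : String), pre = K.toList →
          (∀ c ∈ k.toList, SEPARATORS.contains c = false) → K.toList ≠ k.toList →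
          ∀ sep ∈ (['/', '_', '-'] : List Char),
          PySem.Chars.startswith lowered.toList (k.toList ++ [sep]) = false := by
        intro K k hpreEq hkfree hnek sep hsep
        rw [hL, hpreEq]
        refine sw_keyfree _ s rest _ sep (hpreEq ▸ hpre) hs ?_ hkfree hnek
        fin_cases hsep <;> decide
      rcases hmem with hck | hck | hck | hck | hck | hck | hck
      · have hpreEq : pre = ("scarcity" : String).toList := by rw [← hcand, hck]
        have hLr : lowered.toList = ("scarcity" : String).toList ++ s :: rest := by
          rw [hL, hpreEq]
        rw [hB, hck, hpos', hpreEq]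
        simp only [STRUCTURED_TAG_KEYS]
        rw [innerA_match lowered tag d "scarcity" _ s rest hLr hsd]
      · have hpreEq : pre = ("necessity" : String).toList := by rw [← hcand, hck]
        have hLr : lowered.toList = ("necessity" : String).toList ++ s :: rest := by
          rw [hL, hpreEq]
        rw [hB, hck, hpos', hpreEq]
        simp only [STRUCTURED_TAG_KEYS]
        rw [innerA_skip_of _ _ _ _ _ (hskip2 "necessity" "scarcity" hpreEq (by simp [SEPARATORS]) (by decide)),
            innerA_match lowered tag d "necessity" _ s rest hLr hsd]
      · have hpreEq : pre = ("artificial" : String).toList := by rw [← hcand, hck]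
        have hLr : lowered.toList = ("artificial" : String).toList ++ s :: rest := by
          rw [hL, hpreEq]
        rw [hB, hck, hpos', hpreEq]
        simp only [STRUCTURED_TAG_KEYS]
        rw [innerA_skip_of _ _ _ _ _ (hskip2 "artificial" "scarcity" hpreEq (by simp [SEPARATORS]) (by decide)),
            innerA_skip_of _ _ _ _ _ (hskip2 "artificial" "necessity" hpreEq (by simp [SEPARATORS]) (by decide)),
            innerA_match lowered tag d "artificial" _ s rest hLr hsd]
      · have hpreEq : pre = ("orientation" : String).toList := by rw [← hcand, hck]
        have hLr : lowered.toList = ("orientation" : String).toList ++ s :: rest := by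
          rw [hL, hpreEq]
        rw [hB, hck, hpos', hpreEq]
        simp only [STRUCTURED_TAG_KEYS]
        rw [innerA_skip_of _ _ _ _ _ (hskip2 "orientation" "scarcity" hpreEq (by simp [SEPARATORS]) (by decide)),
            innerA_skip_of _ _ _ _ _ (hskip2 "orientation" "necessity" hpreEq (by simp [SEPARATORS]) (by decide)),
            innerA_skip_of _ _ _ _ _ (hskip2 "orientation" "artificial" hpreEq (by simp [SEPARATORS]) (by decide)),
            innerA_match lowered tag d "orientation" _ s rest hLr hsd]
      · have hpreEq : pre = ("allocation" : String).toList := by rw [← hcand, hck]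
        have hLr : lowered.toList = ("allocation" : String).toList ++ s :: rest := by
          rw [hL, hpreEq]
        rw [hB, hck, hpos', hpreEq]
        simp only [STRUCTURED_TAG_KEYS]
        rw [innerA_skip_of _ _ _ _ _ (hskip2 "allocation" "scarcity" hpreEq (by simp [SEPARATORS]) (by decide)),
            innerA_skip_of _ _ _ _ _ (hskip2 "allocation" "necessity" hpreEq (by simp [SEPARATORS]) (by decide)),
            innerA_skip_of _ _ _ _ _ (hskip2 "allocation" "artificial" hpreEq (by simp [SEPARATORS]) (by decide)),
            innerA_skip_of _ _ _ _ _ (hskip2 "allocation" "orientation" hpreEq (by simp [SEPARATORS]) (by decide)),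
            innerA_match lowered tag d "allocation" _ s rest hLr hsd]
      · have hpreEq : pre = ("cluster" : String).toList := by rw [← hcand, hck]
        have hLr : lowered.toList = ("cluster" : String).toList ++ s :: rest := by
          rw [hL, hpreEq]
        rw [hB, hck, hpos', hpreEq]
        simp only [STRUCTURED_TAG_KEYS]
        rw [innerA_skip_of _ _ _ _ _ (hskip2 "cluster" "scarcity" hpreEq (by simp [SEPARATORS]) (by decide)),
            innerA_skip_of _ _ _ _ _ (hskip2 "cluster" "necessity" hpreEq (by simp [SEPARATORS]) (by decide)),
            innerA_skip_of _ _ _ _ _ (hskip2 "cluster" "artificial" hpreEq (by simp [SEPARATORS]) (by decide)),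
            innerA_skip_of _ _ _ _ _ (hskip2 "cluster" "orientation" hpreEq (by simp [SEPARATORS]) (by decide)),
            innerA_skip_of _ _ _ _ _ (hskip2 "cluster" "allocation" hpreEq (by simp [SEPARATORS]) (by decide)),
            innerA_match lowered tag d "cluster" _ s rest hLr hsd]
      · have hpreEq : pre = ("cluster_membership" : String).toList := by rw [← hcand, hck]
        have hu : SEPARATORS.contains '_' = false := hpre '_' (by rw [hpreEq]; simp)
        exact absurd hu (by decide)

-- the two ports agree on every input
lemma main_eq (tags : List String) :
    extract_structured_tags tags = extract_structured_tags_alt tags := by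
  simp only [extract_structured_tags, extract_structured_tags_alt]
  rw [show STRUCTURED_TAG_KEYS_B = STRUCTURED_TAG_KEYS from rfl]
  exact congrArg PySem.Dict.items
    (List.foldl_ext _ _ _ (fun d tag _ => step_eq d tag))

-- ===== VERDICT (by name: the statement is the Claim_ definition above) =====
theorem extract_structured_tags_spec : Claim_equal_extract_structured_tags := by
  intro tags _
  show extract_structured_tags tags = extract_structured_tags_alt tags
  exact main_eq tags
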